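-- pv_equiv track=rewrite | github.com/durgirajesh/Codeforces | v2/SameDifferences.py | same_differences
-- ===== SOURCE A (Python) =====
-- from collections import defaultdict
--
-- def same_differences(n, nums) :
--     container = defaultdict(int)
--     i, count = 0, 0
--
--     while i < len(nums) :
--         if (i - nums[i]) in container :
--             count += container[(i - nums[i])]
--
--         container [(i - nums[i])] += 1
--         i += 1
--
--     return count
-- ===== SOURCE B (Python) =====
-- from collections import Counter
--
-- def same_differences(n, nums):
--     freq = Counter(i - v for i, v in enumerate(nums))
--     total = 0
--     for c in freq.values():
--         total += c * (c - 1) // 2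
--     return total
-- ===== Notes on version B (the rewrite author's own statement) =====
-- stated objective: alternative
-- what changed: B first builds the full frequency table of the keys i - nums[i] in one pass and then sums the closed-form pair count c*(c-1)//2 per group, instead of A's single pass that accumulates a running count of earlier equal keys.
import Mathlib
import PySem

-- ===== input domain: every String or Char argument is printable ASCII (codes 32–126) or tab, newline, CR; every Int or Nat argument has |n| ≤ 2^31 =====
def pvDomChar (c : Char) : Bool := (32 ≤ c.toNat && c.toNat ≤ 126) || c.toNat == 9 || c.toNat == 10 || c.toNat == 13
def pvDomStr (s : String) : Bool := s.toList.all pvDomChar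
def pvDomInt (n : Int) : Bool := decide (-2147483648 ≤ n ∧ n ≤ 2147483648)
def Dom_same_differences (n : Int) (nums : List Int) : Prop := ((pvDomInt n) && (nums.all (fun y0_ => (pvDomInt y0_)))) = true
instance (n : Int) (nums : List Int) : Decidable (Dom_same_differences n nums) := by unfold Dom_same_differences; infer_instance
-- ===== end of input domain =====

-- B replaces A's running accumulation of earlier equal keys by a two-phase pass: full frequency
-- table of i - nums[i] first, then the closed-form pair count c*(c-1)//2 per group (alternative).

-- ===== PORT A =====
def same_differences (n : Int) (nums : List Int) : Int :=
  ((PySem.List.pyRange 0 (PySem.List.len nums) 1).foldl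
    (fun (st : PySem.Dict Int Int × Int) i =>
      let key := i - PySem.List.pyGetD nums i 0
      let count := if st.1.contains key then st.2 + st.1.getD key 0 else st.2
      (st.1.modify key 0 (· + 1), count))
    (PySem.Dict.empty, 0)).2

-- ===== PORT B =====
def same_differences_alt (n : Int) (nums : List Int) : Int :=
  (PySem.Dict.counter ((PySem.List.enumerate nums 0).map (fun p => p.1 - p.2))).values.foldl
    (fun s c => s + PySem.Int.floordiv (c * (c - 1)) 2) 0

-- ===== PRECONDITION & SPEC =====
def Spec_same_differences (n : Int) (nums : List Int) (out : Int) : Prop := out = same_differences_alt n nums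
instance (n : Int) (nums : List Int) (out : Int) : Decidable (Spec_same_differences n nums out) := by unfold Spec_same_differences; infer_instance

-- ===== CLAIM (what is proved, stated in full; the proofs are below) =====
def Claim_equal_same_differences : Prop := ∀ (n : Int) (nums : List Int), Dom_same_differences n nums → Spec_same_differences n nums (same_differences n nums)

-- ===== LEMMAS AND PROOFS =====

-- A's index loop over range(len(nums)) reading nums[i] is the fold over enumerate(nums)
theorem foldl_pyRange_enumerate {β : Type} (F : β → Int → Int → β) :
    ∀ (suf pre : List Int) (init : β),
      (PySem.List.pyRange (pre.length : Int) ((pre.length : Int) + (suf.length : Int)) 1).foldl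
          (fun st i => F st i (PySem.List.pyGetD (pre ++ suf) i 0)) init
        = (PySem.List.enumerate suf (pre.length : Int)).foldl (fun st p => F st p.1 p.2) init := by
  intro suf
  induction suf with
  | nil => intro pre init; simp [PySem.List.pyRange_one_eq_nil, PySem.List.enumerate_nil]
  | cons v t ih =>
      intro pre init
      have hlt : (pre.length : Int) < (pre.length : Int) + ((v :: t).length : Int) := by
        simp
      rw [PySem.List.pyRange_one_cons hlt, PySem.List.enumerate_cons, List.foldl_cons,
        List.foldl_cons]
      have hget : PySem.List.pyGetD (pre ++ v :: t) ((pre.length : Int)) 0 = v := by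
        rw [PySem.List.pyGetD_natCast]
        simp [List.getD]
      rw [hget]
      have key := ih (pre ++ [v]) (F init (pre.length : Int) v)
      have hlen : (((pre ++ [v]).length : Int)) = (pre.length : Int) + 1 := by
        simp
      have harr : ((pre ++ [v]).length : Int) + ((t.length : Int)) =
          (pre.length : Int) + (((v :: t).length : Int)) := by
        simp; omega
      rw [hlen] at key
      rw [List.append_assoc] at key
      simp only [List.cons_append, List.nil_append] at key
      have : (pre.length : Int) + ((v :: t).length : Int) = (pre.length : Int) + 1 + (t.length : Int) := by
        simp; omega
      rw [this]
      exact key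
-- the dict component of A's fold is Counter(keys)
theorem fst_foldl_stepA (l : List Int) :
    ∀ (d : PySem.Dict Int Int) (c : Int),
      (l.foldl (fun (st : PySem.Dict Int Int × Int) k =>
          (st.1.modify k 0 (· + 1), if st.1.contains k then st.2 + st.1.getD k 0 else st.2)) (d, c)).1
        = l.foldl (fun d k => d.modify k 0 (· + 1)) d := by
  induction l with
  | nil => intro d c; rfl
  | cons x t ih => intro d c; simp [List.foldl_cons, ih]

-- pairs of triangle numbers: ((c+1)*c) // 2 = (c*(c-1)) // 2 + c
theorem floordiv_tri_step (c : Int) :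
    PySem.Int.floordiv ((c + 1) * c) 2 = PySem.Int.floordiv (c * (c - 1)) 2 + c := by
  have h2 : (0:Int) < 2 := by norm_num
  rw [PySem.Int.floordiv_eq_ediv_of_pos h2, PySem.Int.floordiv_eq_ediv_of_pos h2]
  have : (c + 1) * c = c * (c - 1) + c * 2 := by ring
  rw [this, Int.add_mul_ediv_right _ _ (by norm_num : (2:Int) ≠ 0)]

-- replace the value of a map-sum at one member of a Nodup list
theorem sum_map_update {x : Int} (f f' : Int → Int) :
    ∀ (s : List Int), s.Nodup → x ∈ s → (∀ k ∈ s, k ≠ x → f' k = f k) →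
      (s.map f').sum = (s.map f).sum + (f' x - f x) := by
  intro s
  induction s with
  | nil => intro _ h; cases h
  | cons a t ih =>
      intro hnd hmem hagree
      rcases List.mem_cons.mp hmem with rfl | hx
      · have : ∀ k ∈ t, f' k = f k := by
          intro k hk
          exact hagree k (List.mem_cons_of_mem _ hk) (fun h => (List.nodup_cons.mp hnd).1 (h ▸ hk))
        simp [List.map_cons, List.map_congr_left this]; ring
      · have ha : f' a = f a :=
          hagree a (List.mem_cons_self) (fun h => (List.nodup_cons.mp hnd).1 (h ▸ hx))
        have := ih (List.nodup_cons.mp hnd).2 hx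
          (fun k hk => hagree k (List.mem_cons_of_mem _ hk))
        simp [List.map_cons, this, ha]; ring

-- counting k in l ++ [x] when k ≠ x
theorem count_append_ne {l : List Int} {x k : Int} (h : k ≠ x) :
    (l ++ [x]).count k = l.count k := by
  rw [List.count_append]
  have : List.count k [x] = 0 := by
    simp [Ne.symm h]
  omega

-- the heart: running accumulation = Σ over groups of c*(c-1)//2
theorem count_eq_tri (l : List Int) :
    (l.foldl (fun (st : PySem.Dict Int Int × Int) k =>
        (st.1.modify k 0 (· + 1), if st.1.contains k then st.2 + st.1.getD k 0 else st.2))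
      (PySem.Dict.empty, 0)).2
    = ((PySem.Set.ofList l).map
        (fun k => PySem.Int.floordiv ((l.count k : Int) * ((l.count k : Int) - 1)) 2)).sum := by
  induction l using List.reverseRecOn with
  | nil => simp [PySem.Set.ofList]
  | append_singleton l x ih =>
      rw [List.foldl_append, List.foldl_cons, List.foldl_nil]
      have hfst := fst_foldl_stepA l PySem.Dict.empty 0
      have hd : (l.foldl (fun (st : PySem.Dict Int Int × Int) k =>
          (st.1.modify k 0 (· + 1), if st.1.contains k then st.2 + st.1.getD k 0 else st.2))
          (PySem.Dict.empty, 0)).1 = PySem.Dict.counter l := by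
        rw [hfst, PySem.Dict.counter_eq_foldl]
      rw [hd]
      have hadd : PySem.Set.ofList (l ++ [x]) = PySem.Set.add (PySem.Set.ofList l) x := by
        rw [PySem.Set.ofList_eq_foldl, PySem.Set.ofList_eq_foldl, List.foldl_append,
          List.foldl_cons, List.foldl_nil]
      by_cases hx : x ∈ l
      · -- x already seen: group of x grows by one; A adds the old group size
        have hcont : (PySem.Dict.counter l).contains x = true := by
          rw [PySem.Dict.contains_counter]; exact List.contains_iff_mem.mpr hx
        have hmemset : x ∈ PySem.Set.ofList l := (PySem.Set.mem_ofList l x).mpr hx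
        have haddmem : PySem.Set.add (PySem.Set.ofList l) x = PySem.Set.ofList l := by
          simp [PySem.Set.add, PySem.Set.contains, hmemset]
        rw [hadd, haddmem, hcont, if_pos rfl, PySem.Dict.getD_counter, ih]
        have hupd := sum_map_update
          (fun k => PySem.Int.floordiv ((l.count k : Int) * ((l.count k : Int) - 1)) 2)
          (fun k => PySem.Int.floordiv (((l ++ [x]).count k : Int) * (((l ++ [x]).count k : Int) - 1)) 2)
          (PySem.Set.ofList l) (PySem.Set.nodup_ofList l) hmemset
          (by
            intro k hk hkx
            simp only [count_append_ne hkx])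
        rw [hupd]
        have hcx : ((l ++ [x]).count x : Int) = (l.count x : Int) + 1 := by
          rw [List.count_append]; simp
        simp only [hcx]
        have hsimp : ((l.count x : Int) + 1) * ((l.count x : Int) + 1 - 1)
            = ((l.count x : Int) + 1) * ((l.count x : Int)) := by ring
        rw [hsimp, floordiv_tri_step ((l.count x : Int))]
        ring
      · -- fresh key: A adds nothing, B appends a group of size 1 contributing 0
        have hcont : (PySem.Dict.counter l).contains x = false := by
          rw [PySem.Dict.contains_counter]
          simp [hx]
        have hmemset : x ∉ PySem.Set.ofList l := fun h => hx ((PySem.Set.mem_ofList l x).mp h)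
        have haddnew : PySem.Set.add (PySem.Set.ofList l) x = PySem.Set.ofList l ++ [x] := by
          simp [PySem.Set.add, PySem.Set.contains, hmemset]
        rw [hadd, haddnew, hcont]
        simp only [Bool.false_eq_true, if_false]
        rw [List.map_append, List.sum_append, ih]
        have hcong : ∀ k ∈ PySem.Set.ofList l,
            PySem.Int.floordiv (((l ++ [x]).count k : Int) * (((l ++ [x]).count k : Int) - 1)) 2
            = PySem.Int.floordiv ((l.count k : Int) * ((l.count k : Int) - 1)) 2 := by
          intro k hk
          have hkx : k ≠ x := fun h => hmemset (h ▸ hk)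
          rw [count_append_ne hkx]
        rw [List.map_congr_left hcong]
        have hcx : (((l ++ [x]).count x : Nat) : Int) = 1 := by
          rw [List.count_append]
          simp [List.count_eq_zero_of_not_mem hx]
        have hzero : PySem.Int.floordiv ((1 : Int) * ((1 : Int) - 1)) 2 = 0 := by decide
        simp only [List.map_cons, List.map_nil, List.sum_cons, List.sum_nil, hcx, hzero]
        ring
-- ===== VERDICT (by name: the statement is the Claim_ definition above) =====
theorem same_differences_spec : Claim_equal_same_differences := by
  unfold Claim_equal_same_differences Spec_same_differences
  intro n nums _
  show same_differences n nums = same_differences_alt n nums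
  unfold same_differences same_differences_alt
  have hlen : PySem.List.len nums = (nums.length : Int) := by
    simp [PySem.List.len]
  have hbridge := foldl_pyRange_enumerate
    (F := fun (st : PySem.Dict Int Int × Int) i v =>
      ((st.1.modify (i - v) 0 (· + 1)),
        if st.1.contains (i - v) then st.2 + st.1.getD (i - v) 0 else st.2))
    nums [] ((PySem.Dict.empty : PySem.Dict Int Int), (0 : Int))
  simp only [List.length_nil, Nat.cast_zero, List.nil_append, zero_add] at hbridge
  rw [hlen, hbridge]
  have hmap := List.foldl_map
    (f := fun (p : Int × Int) => p.1 - p.2)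
    (g := fun (st : PySem.Dict Int Int × Int) k =>
      (st.1.modify k 0 (· + 1), if st.1.contains k then st.2 + st.1.getD k 0 else st.2))
    (l := PySem.List.enumerate nums 0)
    (init := ((PySem.Dict.empty : PySem.Dict Int Int), (0 : Int)))
  rw [← hmap, count_eq_tri]
  -- now evaluate B's fold over the counter's values
  set keys := (PySem.List.enumerate nums 0).map (fun p => p.1 - p.2) with hkeys
  have hvals : (PySem.Dict.counter keys).values
      = (PySem.Set.ofList keys).map (fun k => ((keys.count k : Nat) : Int)) := by
    show (PySem.Dict.counter keys).items.map (·.2) = _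
    rw [PySem.Dict.items_counter, List.map_map]
    rfl
  rw [hvals, PySem.List.foldl_add, zero_add, List.map_map]
  rfl
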